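-- pv_equiv track=rewrite | github.com/AllrounderTechBrief/Thestreamic | build.py | best_from_srcset
-- ===== SOURCE A (Python) =====
-- def best_from_srcset(srcset: str) -> str:
--     try:
--         parts = [p.strip() for p in srcset.split(",") if p.strip()]
--         if not parts:
--             return ""
--         return parts[-1].split()[0]
--     except Exception:
--         return ""
-- ===== SOURCE B (Python) =====
-- def best_from_srcset(srcset: str) -> str:
--     # Single backward character scan: no intermediate list of all segments,
--     # early exit at the last non-empty comma-separated segment.
--     try:
--         seg = []
--         for ch in reversed(srcset):
--             if ch == ",":
--                 s = "".join(reversed(seg)).strip()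
--                 if s:
--                     return s.split()[0]
--                 seg.clear()
--             else:
--                 seg.append(ch)
--         s = "".join(reversed(seg)).strip()
--         return s.split()[0] if s else ""
--     except Exception:
--         return ""
-- ===== Notes on version B (the rewrite author's own statement) =====
-- stated objective: alternative
-- what changed: Replaces split-all-then-filter-then-index-last with a single backward character scan that accumulates one segment at a time and returns early at the last non-empty segment, never building the list of all parts.
import Mathlib
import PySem

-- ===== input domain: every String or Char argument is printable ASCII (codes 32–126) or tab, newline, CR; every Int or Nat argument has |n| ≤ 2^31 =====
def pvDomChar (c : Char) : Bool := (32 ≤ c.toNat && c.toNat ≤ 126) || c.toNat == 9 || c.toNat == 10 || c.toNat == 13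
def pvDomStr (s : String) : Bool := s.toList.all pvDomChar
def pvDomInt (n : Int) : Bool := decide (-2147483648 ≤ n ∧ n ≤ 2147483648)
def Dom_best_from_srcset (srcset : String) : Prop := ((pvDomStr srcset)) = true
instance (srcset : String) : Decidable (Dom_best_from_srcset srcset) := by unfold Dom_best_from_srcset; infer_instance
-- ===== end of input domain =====

-- B replaces split-all/filter/index-last by a single backward scan with early exit (alternative decomposition, same cost).


-- ===== PORT A =====
-- parts = [p.strip() for p in srcset.split(",") if p.strip()]; if not parts: return ""; return parts[-1].split()[0]
-- (the try/except never fires on a string input: parts[-1] and .split()[0] are only taken on non-empty data,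
--  so the getD defaults below are unreachable).
def best_from_srcset (srcset : String) : String :=
  let parts := (PySem.Chars.splitOn srcset.toList [',']).filterMap
    (fun p => let s := PySem.Chars.strip p; if s = [] then none else some s)
  if parts = [] then ""
  else String.ofList ((PySem.Chars.split₀ (parts.getLast?.getD [])).headD [])

-- ===== PORT B =====
-- backward scan over reversed(srcset): acc is seg (chars appended in scan order, i.e. reversed);
-- "".join(reversed(seg)) is acc.reverse, seg.clear() is [], seg.append(ch) is acc ++ [c]
def bfsAltGo (rcs acc : List Char) : String :=
  match rcs with
  | [] =>
      let s := PySem.Chars.strip acc.reverse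
      if s = [] then "" else String.ofList ((PySem.Chars.split₀ s).headD [])
  | c :: rest =>
      if c = ',' then
        let s := PySem.Chars.strip acc.reverse
        if s = [] then bfsAltGo rest [] else String.ofList ((PySem.Chars.split₀ s).headD [])
      else bfsAltGo rest (acc ++ [c])

def best_from_srcset_alt (srcset : String) : String :=
  bfsAltGo srcset.toList.reverse []

-- ===== PRECONDITION & SPEC =====
def Spec_best_from_srcset (srcset : String) (out : String) : Prop := out = best_from_srcset_alt srcset
instance (srcset : String) (out : String) : Decidable (Spec_best_from_srcset srcset out) := by unfold Spec_best_from_srcset; infer_instance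

-- ===== CLAIM (what is proved, stated in full; the proofs are below) =====
def Claim_equal_best_from_srcset : Prop := ∀ (srcset : String), Dom_best_from_srcset srcset → Spec_best_from_srcset srcset (best_from_srcset srcset)

-- ===== LEMMAS AND PROOFS =====

-- Structural characterisation of splitOn on the single-char separator ','.
def bfsSplitC (cur l : List Char) : List (List Char) :=
  match l with
  | [] => [cur.reverse]
  | c :: rest => if c = ',' then cur.reverse :: bfsSplitC [] rest else bfsSplitC (c :: cur) rest

theorem bfsGo_comma (fuel : Nat) (l cur : List Char) (acc : List (List Char))
    (h : l.length ≤ fuel) :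
    PySem.Chars.splitOn.go [','] fuel l cur acc = acc.reverse ++ bfsSplitC cur l := by
  induction fuel generalizing l cur acc with
  | zero =>
      have : l = [] := List.length_eq_zero_iff.mp (Nat.le_zero.mp h)
      subst this
      simp [PySem.Chars.splitOn.go, bfsSplitC]
  | succ n ih =>
      cases l with
      | nil => simp [PySem.Chars.splitOn.go, bfsSplitC]
      | cons c rest =>
          by_cases hc : c = ','
          · subst hc
            rw [show PySem.Chars.splitOn.go [','] (n+1) (',' :: rest) cur acc
                  = PySem.Chars.splitOn.go [','] n rest [] (cur.reverse :: acc) by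
                  simp [PySem.Chars.splitOn.go, List.isPrefixOf]]
            rw [ih rest [] (cur.reverse :: acc) (by simpa using Nat.le_of_succ_le_succ h)]
            simp [bfsSplitC]
          · rw [show PySem.Chars.splitOn.go [','] (n+1) (c :: rest) cur acc
                  = PySem.Chars.splitOn.go [','] n rest (c :: cur) acc by
                  simp [PySem.Chars.splitOn.go, List.isPrefixOf, Ne.symm hc]]
            rw [ih rest (c :: cur) acc (by simpa using Nat.le_of_succ_le_succ h)]
            simp [bfsSplitC, hc]

theorem bfsSplitOn_comma (l : List Char) :
    PySem.Chars.splitOn l [','] = bfsSplitC [] l := by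
  simpa using bfsGo_comma (l.length + 1) l [] [] (by omega)

theorem bfsSplitC_no_comma (l cur : List Char) (h : ',' ∉ l) :
    bfsSplitC cur l = [cur.reverse ++ l] := by
  induction l generalizing cur with
  | nil => simp [bfsSplitC]
  | cons c rest ih =>
      have hc : c ≠ ',' := fun e => h (e ▸ List.mem_cons_self)
      have hr : ',' ∉ rest := fun m => h (List.mem_cons_of_mem _ m)
      simp [bfsSplitC, hc, ih _ hr]

theorem bfsSplitC_append_comma (xs ys cur : List Char) (h : ',' ∉ ys) :
    bfsSplitC cur (xs ++ ',' :: ys) = bfsSplitC cur xs ++ [ys] := by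
  induction xs generalizing cur with
  | nil => simp [bfsSplitC, bfsSplitC_no_comma ys [] h]
  | cons c rest ih =>
      by_cases hc : c = ','
      · subst hc; simp [bfsSplitC, ih]
      · simp [bfsSplitC, hc, ih]

-- A's body as a function of the character list.
def bfsABody (cs : List Char) : String :=
  let parts := (bfsSplitC [] cs).filterMap
    (fun p => let s := PySem.Chars.strip p; if s = [] then none else some s)
  if parts = [] then ""
  else String.ofList ((PySem.Chars.split₀ (parts.getLast?.getD [])).headD [])

theorem bfsA_eq_body (srcset : String) :
    best_from_srcset srcset = bfsABody srcset.toList := by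
  simp [best_from_srcset, bfsABody, bfsSplitOn_comma]

theorem bfsGo_eq_body (rcs : List Char) : ∀ acc : List Char, ',' ∉ acc →
    bfsAltGo rcs acc = bfsABody (rcs.reverse ++ acc.reverse) := by
  induction rcs with
  | nil =>
      intro acc hacc
      simp only [bfsAltGo, bfsABody, List.reverse_nil, List.nil_append]
      rw [bfsSplitC_no_comma acc.reverse [] (by simpa using hacc)]
      by_cases hs : PySem.Chars.strip acc.reverse = [] <;> simp [hs]
  | cons c rest ih =>
      intro acc hacc
      by_cases hc : c = ','
      · subst hc
        have hxs : (',' :: rest).reverse ++ acc.reverse = rest.reverse ++ ',' :: acc.reverse := by simp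
        rw [hxs]
        simp only [bfsAltGo]
        by_cases hs : PySem.Chars.strip acc.reverse = []
        · rw [if_pos hs, ih [] (by simp)]
          simp only [bfsABody, List.reverse_nil, List.append_nil]
          rw [bfsSplitC_append_comma _ _ _ (by simpa using hacc)]
          simp [List.filterMap_append, hs]
        · rw [if_neg hs]
          simp only [bfsABody]
          rw [bfsSplitC_append_comma _ _ _ (by simpa using hacc)]
          simp [List.filterMap_append, hs]
      · have hxs : (c :: rest).reverse ++ acc.reverse = rest.reverse ++ (acc ++ [c]).reverse := by simp
        rw [hxs]
        simp only [bfsAltGo, if_neg hc]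
        exact ih (acc ++ [c]) (by simp [hacc, Ne.symm hc])

-- ===== VERDICT (by name: the statement is the Claim_ definition above) =====
theorem best_from_srcset_spec : Claim_equal_best_from_srcset := by
  intro srcset _
  unfold Spec_best_from_srcset
  rw [bfsA_eq_body, best_from_srcset_alt, bfsGo_eq_body _ [] (by simp)]
  simp
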